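-- pv_equiv track=rewrite | github.com/tam1006/Atcoder-Beginner-Contest | problems/ABC/171/d/abc171_d.py | solve
-- ===== SOURCE A (Python) =====
-- from collections import defaultdict
--
-- def solve(N, A, Q, B, C):
--     d = defaultdict(int)
--     for i in range(N):
--         d[A[i]] += 1
--
--     S = sum(A)
--     ans = []
--     for i in range(Q):
--         S -= d[B[i]] * B[i]
--         S += d[B[i]] * C[i]
--         d[C[i]] += d[B[i]]
--         d[B[i]] = 0
--         ans.append(S)
--
--     return ans
-- ===== SOURCE B (Python) =====
-- def solve(N, A, Q, B, C):
--     arr = list(A)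
--     ans = []
--     for i in range(Q):
--         b, c = B[i], C[i]
--         for j in range(N):
--             if arr[j] == b:
--                 arr[j] = c
--         ans.append(sum(arr))
--     return ans
-- ===== Notes on version B (the rewrite author's own statement) =====
-- stated objective: alternative
-- what changed: B drops A's value-count dictionary and incrementally maintained running sum and instead keeps a mutable copy of the values, rewriting every B[i] into C[i] by a per-query scan of the first N positions and recomputing the sum each query; Pre_ excludes N or Q beyond the list lengths (A raises IndexError) and queries with B[i] == C[i], a corner outside the source problem's B_i != C_i guarantee where A's counter silently zeroes the value while B's rescan keeps it.
-- outside the precondition, e.g. on solve(2, [5, 5], 2, [5, 5], [5, 6]): A returns [10, 10], B returns [10, 12]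
import Mathlib
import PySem

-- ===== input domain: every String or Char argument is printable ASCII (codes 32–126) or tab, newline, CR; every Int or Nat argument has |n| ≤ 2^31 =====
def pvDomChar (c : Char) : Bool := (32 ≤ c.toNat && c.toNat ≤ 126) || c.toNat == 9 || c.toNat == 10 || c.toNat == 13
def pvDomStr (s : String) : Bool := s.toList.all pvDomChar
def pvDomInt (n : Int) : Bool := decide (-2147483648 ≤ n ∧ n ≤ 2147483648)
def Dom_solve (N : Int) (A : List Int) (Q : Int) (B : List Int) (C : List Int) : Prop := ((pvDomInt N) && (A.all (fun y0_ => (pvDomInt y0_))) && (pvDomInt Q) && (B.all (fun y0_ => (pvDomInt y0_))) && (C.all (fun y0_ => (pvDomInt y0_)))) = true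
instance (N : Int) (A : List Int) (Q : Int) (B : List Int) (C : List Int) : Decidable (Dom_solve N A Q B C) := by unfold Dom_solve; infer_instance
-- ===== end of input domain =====

-- B replaces A's count-dictionary + running sum with a mutable copy of the values, rewriting
-- B[i] -> C[i] by a per-query scan and recomputing the sum (an 'alternative' decomposition,
-- not faster); return values only, neither version mutates its arguments.

-- ===== PORT A =====
def solve (N : Int) (A : List Int) (Q : Int) (B : List Int) (C : List Int) : List Int :=
  -- d = defaultdict(int); for i in range(N): d[A[i]] += 1
  let d : PySem.Dict Int Int :=
    (PySem.List.pyRange 0 N).foldl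
      (fun d i => d.modify (PySem.List.pyGetD A i 0) 0 (· + 1)) PySem.Dict.empty
  -- S = sum(A); ans = []; for i in range(Q): …
  let st :=
    (PySem.List.pyRange 0 Q).foldl
      (fun (st : Int × PySem.Dict Int Int × List Int) i =>
        let b := PySem.List.pyGetD B i 0
        let c := PySem.List.pyGetD C i 0
        let S := st.1 - st.2.1.getD b 0 * b          -- S -= d[B[i]] * B[i]
        let S := S + st.2.1.getD b 0 * c             -- S += d[B[i]] * C[i]
        let d := st.2.1.modify c 0 (· + st.2.1.getD b 0)  -- d[C[i]] += d[B[i]]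
        let d := d.insert b 0                        -- d[B[i]] = 0
        (S, d, st.2.2 ++ [S]))                       -- ans.append(S)
      (A.sum, d, ([] : List Int))
  st.2.2

-- ===== PORT B =====
def solve_alt (N : Int) (A : List Int) (Q : Int) (B : List Int) (C : List Int) : List Int :=
  let st :=
    (PySem.List.pyRange 0 Q).foldl
      (fun (st : List Int × List Int) i =>
        let b := PySem.List.pyGetD B i 0
        let c := PySem.List.pyGetD C i 0
        -- for j in range(N): if arr[j] == b: arr[j] = c
        let arr :=
          (PySem.List.pyRange 0 N).foldl
            (fun a j => if PySem.List.pyGetD a j 0 = b then PySem.List.pySetD a j c else a) st.1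
        (arr, st.2 ++ [arr.sum]))                   -- ans.append(sum(arr))
      (A, ([] : List Int))                          -- arr = list(A)
  st.2

-- ===== PRECONDITION & SPEC =====
-- Pre_ excludes (a) N > len(A) or Q > len(B)/len(C), where A raises IndexError, and
-- (b) queries with B[i] == C[i] — outside the source problem's guarantee B_i ≠ C_i — a corner nobody
-- specifies, where A's counter silently discards the value (d[C]+=d[B]; d[B]=0 zeroes it) while its
-- running sum keeps it, and B's rescan keeps the values.
def Pre_solve (N : Int) (A : List Int) (Q : Int) (B : List Int) (C : List Int) : Prop :=
  N ≤ (A.length : Int) ∧ Q ≤ (B.length : Int) ∧ Q ≤ (C.length : Int) ∧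
  ∀ p ∈ (B.take Q.toNat).zip (C.take Q.toNat), p.1 ≠ p.2
instance (N : Int) (A : List Int) (Q : Int) (B : List Int) (C : List Int) : Decidable (Pre_solve N A Q B C) := by unfold Pre_solve; infer_instance

def pvWitness_solve : Int × List Int × Int × List Int × List Int := (3, [1, 2, 3], 2, [1, 2], [2, 5])

def Spec_solve (N : Int) (A : List Int) (Q : Int) (B : List Int) (C : List Int) (out : List Int) : Prop := out = solve_alt N A Q B C
instance (N : Int) (A : List Int) (Q : Int) (B : List Int) (C : List Int) (out : List Int) : Decidable (Spec_solve N A Q B C out) := by unfold Spec_solve; infer_instance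

-- ===== CLAIM (what is proved, stated in full; the proofs are below) =====
def Claim_equal_solve : Prop := ∀ (N : Int) (A : List Int) (Q : Int) (B : List Int) (C : List Int), Dom_solve N A Q B C → Pre_solve N A Q B C → Spec_solve N A Q B C (solve N A Q B C)

-- ===== LEMMAS AND PROOFS =====

-- take of an append at the first part's length
lemma take_len_append {α : Type} (l1 l2 : List α) : (l1 ++ l2).take l1.length = l1 := by
  induction l1 with
  | nil => simp
  | cons a t ih => simp

-- getD of an append, indexed at the first part's length
lemma getD_len_append {α : Type} (l1 l2 : List α) (x d : α) :
    (l1 ++ x :: l2).getD l1.length d = x := by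
  induction l1 with
  | nil => rfl
  | cons a t ih => simp

-- sum after replacing every b by c
lemma sum_map_replace (arr : List Int) (b c : Int) :
    (arr.map (fun x => if x = b then c else x)).sum = arr.sum + (arr.count b : Int) * (c - b) := by
  induction arr with
  | nil => simp
  | cons a t ih =>
    simp only [List.map_cons, List.sum_cons, ih, List.count_cons, beq_iff_eq]
    by_cases h : a = b
    · simp [h]; ring
    · simp [h]; ring

-- occurrence counts after replacing every b by c (b ≠ c)
lemma count_map_replace (arr : List Int) (b c x : Int) (hbc : b ≠ c) :
    (arr.map (fun y => if y = b then c else y)).count x =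
      if x = b then 0 else if x = c then arr.count c + arr.count b else arr.count x := by
  induction arr with
  | nil => simp
  | cons a t ih =>
    simp only [List.map_cons, List.count_cons, ih, beq_iff_eq]
    by_cases hab : a = b <;> by_cases hxb : x = b <;> by_cases hxc : x = c <;>
      simp_all <;> first
        | omega
        | exact fun h => hbc (Eq.symm h)
        | simp_all [Ne.symm hxb, Ne.symm hxc]

-- B's inner scan over range(N) rewrites every b in the first-N prefix to c and leaves the rest
lemma inner_scan_eq (N : Int) (arr : List Int) (b c : Int)
    (h : (max N 0).toNat ≤ arr.length) :
    (PySem.List.pyRange 0 N).foldl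
      (fun a j => if PySem.List.pyGetD a j 0 = b then PySem.List.pySetD a j c else a) arr =
    (arr.take (max N 0).toNat).map (fun x => if x = b then c else x) ++ arr.drop (max N 0).toNat := by
  have hm : ((max N 0).toNat : Int) = max N 0 := Int.toNat_of_nonneg (le_max_right N 0)
  have hr : PySem.List.pyRange 0 N = PySem.List.pyRange 0 ((max N 0).toNat : Int) := by
    by_cases hN : 0 ≤ N
    · rw [hm, max_eq_left hN]
    · rw [PySem.List.pyRange_one_eq_nil (by omega),
        PySem.List.pyRange_one_eq_nil (by omega)]
  rw [hr, PySem.List.pyRange_zero_natCast, List.foldl_map]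
  generalize (max N 0).toNat = n at h ⊢
  induction n with
  | zero => simp
  | succ m ih =>
    have hm' : m ≤ arr.length := by omega
    have hlt : m < arr.length := by omega
    have hdrop : arr.drop m = arr[m] :: arr.drop (m + 1) := List.drop_eq_getElem_cons hlt
    have htake : arr.take (m + 1) = arr.take m ++ [arr[m]] := by
      rw [List.take_add_one, List.getElem?_eq_getElem hlt]
      rfl
    have hpl : ((arr.take m).map (fun x => if x = b then c else x)).length = m := by
      simp; omega
    rw [List.range_succ, List.foldl_append, ih hm', List.foldl_cons, List.foldl_nil]
    have hget : PySem.List.pyGetD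
        ((arr.take m).map (fun x => if x = b then c else x) ++ arr.drop m) (m : Int) 0 = arr[m] := by
      rw [PySem.List.pyGetD_natCast, hdrop]
      have hg := getD_len_append ((arr.take m).map (fun x => if x = b then c else x))
        (arr.drop (m + 1)) arr[m] (0 : Int)
      rw [hpl] at hg
      exact hg
    rw [hget]
    by_cases hx : arr[m] = b
    · have hf : (fun x : Int => if x = b then c else x) arr[m] = c := by simp [hx]
      rw [if_pos hx, PySem.List.pySetD_natCast, List.set_append, if_neg (by omega), hpl,
        Nat.sub_self, hdrop, List.set_cons_zero, htake, List.map_append]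
      simp only [List.map_cons, List.map_nil, hf]
      simp
    · have hf : (fun x : Int => if x = b then c else x) arr[m] = arr[m] := by simp [hx]
      rw [if_neg hx, htake, hdrop, List.map_append]
      simp only [List.map_cons, List.map_nil, hf]
      simp

-- the two query loops produce the same answer list from related states
lemma loop_eq (Bl Cl : List Int) (N : Int) :
    ∀ (idxs : List Int) (d : PySem.Dict Int Int) (S : Int) (arr ans : List Int),
      (max N 0).toNat ≤ arr.length →
      (∀ x, d.getD x 0 = ((arr.take (max N 0).toNat).count x : Int)) →
      S = arr.sum →
      (∀ i ∈ idxs, PySem.List.pyGetD Bl i 0 ≠ PySem.List.pyGetD Cl i 0) →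
      (idxs.foldl
        (fun (st : Int × PySem.Dict Int Int × List Int) i =>
          let b := PySem.List.pyGetD Bl i 0
          let c := PySem.List.pyGetD Cl i 0
          let S := st.1 - st.2.1.getD b 0 * b
          let S := S + st.2.1.getD b 0 * c
          let d := st.2.1.modify c 0 (· + st.2.1.getD b 0)
          let d := d.insert b 0
          (S, d, st.2.2 ++ [S])) (S, d, ans)).2.2 =
      (idxs.foldl
        (fun (st : List Int × List Int) i =>
          let b := PySem.List.pyGetD Bl i 0
          let c := PySem.List.pyGetD Cl i 0
          let arr :=
            (PySem.List.pyRange 0 N).foldl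
              (fun a j => if PySem.List.pyGetD a j 0 = b then PySem.List.pySetD a j c else a) st.1
          (arr, st.2 ++ [arr.sum])) (arr, ans)).2 := by
  intro idxs
  induction idxs with
  | nil => intro d S arr ans hlen hinv hS hbc; rfl
  | cons i tl ih =>
    intro d S arr ans hlen hinv hS hbc
    set n := (max N 0).toNat with hn
    set b := PySem.List.pyGetD Bl i 0 with hb
    set c := PySem.List.pyGetD Cl i 0 with hc
    have hbci : b ≠ c := hbc i (by simp)
    set p := arr.take n with hp
    have hscan := inner_scan_eq N arr b c hlen
    set arr' := p.map (fun x => if x = b then c else x) ++ arr.drop n with harr'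
    have hl1 : (p.map (fun x => if x = b then c else x)).length = n := by
      simp [hp]; omega
    have hlen' : n ≤ arr'.length := by
      rw [harr', List.length_append, hl1]; omega
    have htake' : arr'.take n = p.map (fun x => if x = b then c else x) := by
      rw [harr', ← hl1, take_len_append]
    have harrsum : arr.sum = p.sum + (arr.drop n).sum := by
      rw [hp, ← List.sum_append, List.take_append_drop]
    have hS' : S - d.getD b 0 * b + d.getD b 0 * c = arr'.sum := by
      rw [harr', List.sum_append, sum_map_replace, hinv, hS, harrsum]
      ring
    simp only [List.foldl_cons, ← hb, ← hc, hscan]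
    rw [hS']
    refine ih _ _ _ _ hlen' (fun x => ?_) rfl (fun j hj => hbc j (by simp [hj]))
    rw [PySem.Dict.getD_insert, PySem.Dict.getD_modify, htake',
      count_map_replace _ _ _ _ hbci]
    by_cases hxb : x = b
    · simp [hxb]
    · by_cases hxc : x = c
      · simp [hxc, hinv]
      · simp [hxb, hxc, hinv]

-- the counting loop over range(N) builds the counter of the first-N prefix
lemma counter_prefix (A : List Int) (N : Int) (h : N ≤ (A.length : Int)) :
    (PySem.List.pyRange 0 N).foldl
      (fun d i => d.modify (PySem.List.pyGetD A i 0) 0 (· + 1)) PySem.Dict.empty =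
    PySem.Dict.counter (A.take (max N 0).toNat) := by
  have hm : ((max N 0).toNat : Int) = max N 0 := Int.toNat_of_nonneg (le_max_right N 0)
  have hr : PySem.List.pyRange 0 N = PySem.List.pyRange 0 ((max N 0).toNat : Int) := by
    by_cases hN : 0 ≤ N
    · rw [hm, max_eq_left hN]
    · rw [PySem.List.pyRange_one_eq_nil (by omega),
        PySem.List.pyRange_one_eq_nil (by omega)]
  have hlen : (max N 0).toNat ≤ A.length := by omega
  have hmap : (List.range (max N 0).toNat).map
      (fun (k : Nat) => PySem.List.pyGetD A ((k : Nat) : Int) 0) = A.take (max N 0).toNat := by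
    apply List.ext_getElem
    · simp [hlen]
    · intro k h1 h2
      simp only [List.getElem_map, List.getElem_range, List.getElem_take]
      rw [PySem.List.pyGetD_natCast,
        List.getD_eq_getElem A 0 (by simp at h1; omega)]
  rw [hr, PySem.List.pyRange_zero_natCast, List.foldl_map,
    PySem.Dict.counter_eq_foldl, ← hmap, List.foldl_map]

-- ===== VERDICT (by name: the statement is the Claim_ definition above) =====
theorem solve_spec : Claim_equal_solve := by
  intro N A Q B C _ hpre
  obtain ⟨hNA, hQB, hQC, hbc⟩ := hpre
  unfold Spec_solve solve solve_alt
  simp only []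
  rw [counter_prefix A N hNA]
  refine loop_eq B C N (PySem.List.pyRange 0 Q) _ _ _ _
    (by omega)
    (fun x => PySem.Dict.getD_counter _ x)
    rfl
    (fun i hi => ?_)
  obtain ⟨h0, hQ⟩ := PySem.List.mem_pyRange_one.mp hi
  have hiB : i.toNat < B.length := by omega
  have hiC : i.toNat < C.length := by omega
  have hiQ : i.toNat < Q.toNat := by omega
  have hmem : (B[i.toNat], C[i.toNat]) ∈ (B.take Q.toNat).zip (C.take Q.toNat) := by
    have hz : i.toNat < ((B.take Q.toNat).zip (C.take Q.toNat)).length := by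
      simp [List.length_zip]; omega
    have := List.getElem_mem hz
    simpa [List.getElem_zip, List.getElem_take] using this
  have hne := hbc _ hmem
  rw [PySem.List.pyGetD_of_nonneg B 0 h0, PySem.List.pyGetD_of_nonneg C 0 h0,
    List.getD_eq_getElem B 0 hiB, List.getD_eq_getElem C 0 hiC]
  exact hne
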